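-- pv_equiv track=rewrite | github.com/aldanalina/steganography | 1/steganography_ascii.py | symbol_replace_hide
-- ===== SOURCE A (Python) =====
-- def text_to_binary(text):
--     """Мәтінді екілік кодқа айналдыру"""
--     return ''.join(format(ord(c), '08b') for c in text)
--
-- def symbol_replace_hide(cover_text, secret_message):
--     """Пробелдерді алмастыру арқылы жасыру"""
--     binary = text_to_binary(secret_message)
--     result = list(cover_text)
--
--     # Барлық пробелдерді табу
--     spaces_found = []
--     for i, char in enumerate(result):
--         if char == ' ':
--             spaces_found.append(i)
--
--     # Егер пробелдер жетпейтін болса, мәтінді кеңейту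
--     if len(binary) > len(spaces_found):
--         # Мәтінді қайталап, көбірек пробел қосу
--         multiplier = (len(binary) // len(spaces_found)) + 1 if spaces_found else 1
--         extended_text = cover_text * multiplier
--         result = list(extended_text)
--         spaces_found = [i for i, char in enumerate(result) if char == ' ']
--
--     # Биттерді енгізу (тек қажетті мөлшерде)
--     for bit_index in range(min(len(binary), len(spaces_found))):
--         space_pos = spaces_found[bit_index]
--         if binary[bit_index] == '1':
--             result[space_pos] = '\xa0'  # Non-breaking space
--
--     return ''.join(result)
-- ===== SOURCE B (Python) =====
-- def text_to_binary(text):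
--     return ''.join(format(ord(c), '08b') for c in text)
--
-- def symbol_replace_hide(cover_text, secret_message):
--     binary = text_to_binary(secret_message)
--     space_count = cover_text.count(' ')
--     if len(binary) > space_count:
--         multiplier = (len(binary) // space_count) + 1 if space_count else 1
--         text = cover_text * multiplier
--     else:
--         text = cover_text
--     out = []
--     bi = 0
--     for ch in text:
--         if ch == ' ' and bi < len(binary):
--             out.append('\xa0' if binary[bi] == '1' else ' ')
--             bi += 1
--         else:
--             out.append(ch)
--     return ''.join(out)
-- ===== Notes on version B (the rewrite author's own statement) =====
-- stated objective: simpler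
-- what changed: Replaces A's two-phase scheme (collect a list of all space indices, then index-and-set the first min(len(binary),len(spaces)) of them) by a space count plus one fused pass over the chosen text that consumes bits with a pointer as it copies characters.
import Mathlib
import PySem

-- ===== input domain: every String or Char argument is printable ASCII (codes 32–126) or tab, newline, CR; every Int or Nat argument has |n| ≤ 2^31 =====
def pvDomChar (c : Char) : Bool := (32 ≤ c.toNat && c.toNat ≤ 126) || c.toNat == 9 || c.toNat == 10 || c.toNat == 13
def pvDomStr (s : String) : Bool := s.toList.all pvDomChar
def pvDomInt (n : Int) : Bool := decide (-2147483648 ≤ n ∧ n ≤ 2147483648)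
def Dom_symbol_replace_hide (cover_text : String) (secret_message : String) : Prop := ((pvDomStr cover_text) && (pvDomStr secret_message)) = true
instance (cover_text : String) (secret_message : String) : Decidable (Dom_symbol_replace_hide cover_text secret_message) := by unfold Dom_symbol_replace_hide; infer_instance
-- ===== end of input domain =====

-- B replaces A's collect-space-positions-then-index-and-set scheme by a space count and one
-- fused bit-consuming pass over the chosen text; same result, simpler structure (objective: simpler).

-- ===== PORT A =====
-- format(ord(c), '08b'): exact for Dom characters (all codes < 256, so exactly 8 binary digits)
def pvBits8 (n : Nat) : List Char :=
  [7, 6, 5, 4, 3, 2, 1, 0].map (fun k => if n / 2 ^ k % 2 = 1 then '1' else '0')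

-- text_to_binary: ''.join over the characters
def pvTextToBinary (s : String) : List Char :=
  s.toList.flatMap (fun c => pvBits8 c.toNat)

-- literal port of A: enumerate-and-append loop for spaces, optional extension, then the
-- range(min(...)) loop setting result[space_pos] (indices produced by enumerate are in range)
def symbol_replace_hide (cover_text : String) (secret_message : String) : String :=
  let binary := pvTextToBinary secret_message
  let result : List Char := cover_text.toList
  let spaces_found : List Nat :=
    result.zipIdx.foldl (fun acc p => if p.1 = ' ' then acc ++ [p.2] else acc) []
  let st :=
    if binary.length > spaces_found.length then
      let multiplier := if spaces_found ≠ [] then binary.length / spaces_found.length + 1 else 1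
      let result2 := (List.replicate multiplier cover_text.toList).flatten
      let spaces2 := result2.zipIdx.filterMap (fun p => if p.1 = ' ' then some p.2 else none)
      (result2, spaces2)
    else (result, spaces_found)
  let result :=
    (List.range (min binary.length st.2.length)).foldl
      (fun acc bit_index =>
        let space_pos := st.2.getD bit_index 0
        if binary.getD bit_index ' ' = '1' then acc.set space_pos (Char.ofNat 160) else acc)
      st.1
  String.mk result

-- ===== PORT B =====
-- the fused pass: copy characters, consuming one bit per space while bits remain
def pvWalk : List Char → List Char → List Char
  | [], _ => []
  | c :: rest, [] => c :: pvWalk rest []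
  | c :: rest, b :: bs =>
    if c = ' ' then (if b = '1' then Char.ofNat 160 else ' ') :: pvWalk rest bs
    else c :: pvWalk rest (b :: bs)

def symbol_replace_hide_alt (cover_text : String) (secret_message : String) : String :=
  let binary := pvTextToBinary secret_message
  let space_count := cover_text.toList.count ' '
  let text :=
    if binary.length > space_count then
      (List.replicate (if space_count ≠ 0 then binary.length / space_count + 1 else 1)
        cover_text.toList).flatten
    else cover_text.toList
  String.mk (pvWalk text binary)

-- ===== PRECONDITION & SPEC =====
def Spec_symbol_replace_hide (cover_text : String) (secret_message : String) (out : String) : Prop := out = symbol_replace_hide_alt cover_text secret_message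
instance (cover_text : String) (secret_message : String) (out : String) : Decidable (Spec_symbol_replace_hide cover_text secret_message out) := by unfold Spec_symbol_replace_hide; infer_instance

-- ===== CLAIM (what is proved, stated in full; the proofs are below) =====
def Claim_equal_symbol_replace_hide : Prop := ∀ (cover_text : String) (secret_message : String), Dom_symbol_replace_hide cover_text secret_message → Spec_symbol_replace_hide cover_text secret_message (symbol_replace_hide cover_text secret_message)

-- ===== LEMMAS AND PROOFS =====

-- the list of indices of spaces in l, counting from n
def pvSpacesPos : List Char → Nat → List Nat
  | [], _ => []
  | c :: t, n => if c = ' ' then n :: pvSpacesPos t (n + 1) else pvSpacesPos t (n + 1)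

theorem pvSpacesPos_shift (l : List Char) (n : Nat) :
    pvSpacesPos l (n + 1) = (pvSpacesPos l n).map (· + 1) := by
  induction l generalizing n with
  | nil => rfl
  | cons c t ih =>
    simp only [pvSpacesPos]
    split_ifs with h
    · simp [ih]
    · exact ih _

theorem pvSpacesPos_length (l : List Char) (n : Nat) :
    (pvSpacesPos l n).length = l.count ' ' := by
  induction l generalizing n with
  | nil => rfl
  | cons c t ih =>
    by_cases h : c = ' '
    · simp [pvSpacesPos, h, ih]
    · simp [pvSpacesPos, h, ih]

theorem pvSpaces_foldl (l : List Char) (n : Nat) (acc : List Nat) :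
    (l.zipIdx n).foldl (fun acc p => if p.1 = ' ' then acc ++ [p.2] else acc) acc
      = acc ++ pvSpacesPos l n := by
  induction l generalizing n acc with
  | nil => simp [pvSpacesPos]
  | cons c t ih =>
    simp only [List.zipIdx, List.foldl_cons, pvSpacesPos]
    split_ifs with h <;> simp [ih]

theorem pvSpaces_filterMap (l : List Char) (n : Nat) :
    (l.zipIdx n).filterMap (fun p => if p.1 = ' ' then some p.2 else none)
      = pvSpacesPos l n := by
  induction l generalizing n with
  | nil => rfl
  | cons c t ih =>
    simp only [List.zipIdx, List.filterMap_cons, pvSpacesPos]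
    split_ifs with h <;> simp [ih]

-- the fold body of A's bit-setting loop, on (bit, position) pairs
def pvSetBit (acc : List Char) (p : Char × Nat) : List Char :=
  if p.1 = '1' then acc.set p.2 (Char.ofNat 160) else acc

theorem pvShiftFold (bits : List Char) (ps : List Nat) (x : Char) (t : List Char) :
    (bits.zip (ps.map (· + 1))).foldl pvSetBit (x :: t)
      = x :: (bits.zip ps).foldl pvSetBit t := by
  induction bits generalizing ps x t with
  | nil => rfl
  | cons b bs ih =>
    cases ps with
    | nil => rfl
    | cons p pt =>
      simp only [List.map_cons, List.zip_cons_cons, List.foldl_cons, pvSetBit]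
      split_ifs with h
      · simpa using ih pt _ _
      · exact ih pt _ _

theorem pvWalk_nil (t : List Char) : pvWalk t [] = t := by
  induction t with
  | nil => rfl
  | cons c r ih => simp [pvWalk, ih]

theorem pvKey (l : List Char) (bits : List Char) :
    (bits.zip (pvSpacesPos l 0)).foldl pvSetBit l = pvWalk l bits := by
  induction l generalizing bits with
  | nil => simp [pvSpacesPos, pvWalk]
  | cons c t ih =>
    by_cases hc : c = ' '
    · cases bits with
      | nil => simp [pvWalk, pvWalk_nil]
      | cons b bs =>
        simp only [pvSpacesPos, if_pos hc]
        rw [pvSpacesPos_shift, List.zip_cons_cons, List.foldl_cons]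
        have hstep : pvSetBit (c :: t) (b, 0)
            = (if b = '1' then Char.ofNat 160 else ' ') :: t := by
          by_cases hb : b = '1' <;> simp [pvSetBit, hb, hc]
        rw [hstep, pvShiftFold, ih]
        simp [pvWalk, hc]
    · have hsp : pvSpacesPos (c :: t) 0 = (pvSpacesPos t 0).map (· + 1) := by
        simp [pvSpacesPos, hc, pvSpacesPos_shift]
      rw [hsp, pvShiftFold, ih]
      cases bits with
      | nil => simp [pvWalk]
      | cons b bs => simp [pvWalk, hc]

-- A's range(min)-indexed loop is the fold over the zipped (bit, position) pairs
theorem pvRangeFold (bits : List Char) (ps : List Nat) (l : List Char) :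
    (List.range (min bits.length ps.length)).foldl
        (fun acc bit_index =>
          let space_pos := ps.getD bit_index 0
          if bits.getD bit_index ' ' = '1' then acc.set space_pos (Char.ofNat 160) else acc) l
      = (bits.zip ps).foldl pvSetBit l := by
  have hmap : (List.range (min bits.length ps.length)).map
      (fun i => (bits.getD i ' ', ps.getD i 0)) = bits.zip ps := by
    apply List.ext_getElem
    · simp [List.length_zip]
    · intro i h1 h2
      have hi : i < min bits.length ps.length := by simpa using h1
      have hb : i < bits.length := lt_of_lt_of_le hi (min_le_left _ _)
      have hp : i < ps.length := lt_of_lt_of_le hi (min_le_right _ _)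
      simp [hb, hp, List.getElem_zip]
  rw [← hmap, List.foldl_map]
  rfl

-- ===== VERDICT (by name: the statement is the Claim_ definition above) =====
theorem symbol_replace_hide_spec : Claim_equal_symbol_replace_hide := by
  intro cover_text secret_message _
  unfold Spec_symbol_replace_hide symbol_replace_hide symbol_replace_hide_alt
  simp only []
  rw [show cover_text.toList.zipIdx = cover_text.toList.zipIdx 0 from rfl, pvSpaces_foldl]
  simp only [List.nil_append]
  rw [pvSpacesPos_length]
  have hne : (pvSpacesPos cover_text.toList 0 ≠ []) ↔ (cover_text.toList.count ' ' ≠ 0) := by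
    rw [← pvSpacesPos_length cover_text.toList 0]
    simp [List.length_eq_zero_iff]
  by_cases hgt : (pvTextToBinary secret_message).length > cover_text.toList.count ' '
  · rw [if_pos hgt, if_pos hgt]
    simp only [hne]
    rw [show ∀ r : List Char, r.zipIdx = r.zipIdx 0 from fun _ => rfl,
        pvSpaces_filterMap, pvRangeFold, pvKey]
  · rw [if_neg hgt, if_neg hgt]
    dsimp only
    rw [pvRangeFold, pvKey]
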